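-- pv_equiv track=rewrite | github.com/Aasthaengg/IBMdataset | Python_codes/p03488/s617691971.py | solve
-- ===== SOURCE A (Python) =====
-- def solve(l, t0, t):
--     s = {t0}
--     for v in l:
--         s, ps = set(), s
--         for a in ps:
--             s.add(a+v)
--             s.add(a-v)
--     return t in s
-- ===== SOURCE B (Python) =====
-- def solve(l, t0, t):
--     # Meet in the middle: reachable offsets of each half, then combine.
--     def sums(vs):
--         s = {0}
--         for v in vs:
--             s = {a + v for a in s} | {a - v for a in s}
--         return s
--     h = len(l) // 2
--     s1 = sums(l[:h])
--     s2 = sums(l[h:])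
--     d = t - t0
--     return any((d - x) in s2 for x in s1)
-- ===== Notes on version B (the rewrite author's own statement) =====
-- stated objective: alternative
-- what changed: Replaces the single breadth-first expansion of the full reachable set by a meet-in-the-middle scheme: reachable offsets of each half of the list are computed separately and combined by membership tests.
import Mathlib
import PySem

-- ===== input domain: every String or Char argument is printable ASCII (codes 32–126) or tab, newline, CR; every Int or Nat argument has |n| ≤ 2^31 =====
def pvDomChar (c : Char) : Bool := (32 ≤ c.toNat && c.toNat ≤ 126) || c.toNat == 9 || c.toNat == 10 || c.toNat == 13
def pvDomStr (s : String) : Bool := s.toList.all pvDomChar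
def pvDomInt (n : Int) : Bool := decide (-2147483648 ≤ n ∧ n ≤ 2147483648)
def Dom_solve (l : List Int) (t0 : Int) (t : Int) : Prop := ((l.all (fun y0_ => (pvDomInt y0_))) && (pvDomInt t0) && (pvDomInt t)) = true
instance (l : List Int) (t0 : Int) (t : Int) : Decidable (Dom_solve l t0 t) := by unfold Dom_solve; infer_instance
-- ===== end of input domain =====

-- B replaces A's single breadth-first expansion of the reachable set by a
-- meet-in-the-middle scheme (reachable offsets of each half, combined by lookup).

-- ===== PORT A =====
-- inner loop 'for a in ps: s.add(a+v); s.add(a-v)'; the result is only used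
-- for membership, so folding over the set's list representation is exact
def solveStep (ps : PySem.Set Int) (v : Int) : PySem.Set Int :=
  ps.foldl (fun s a => PySem.Set.add (PySem.Set.add s (a + v)) (a - v)) PySem.Set.empty

def solve (l : List Int) (t0 : Int) (t : Int) : Bool :=
  PySem.Set.contains (l.foldl solveStep (PySem.Set.add PySem.Set.empty t0)) t

-- ===== PORT B =====
-- s = {a+v for a in s} | {a-v for a in s}
def sumsB (vs : List Int) : PySem.Set Int :=
  vs.foldl
    (fun s v => PySem.Set.union (PySem.Set.ofList (s.map (fun a => a + v))) (s.map (fun a => a - v)))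
    (PySem.Set.add PySem.Set.empty 0)

def solve_alt (l : List Int) (t0 : Int) (t : Int) : Bool :=
  let h := l.length / 2
  let s1 := sumsB (l.take h)
  let s2 := sumsB (l.drop h)
  let d := t - t0
  s1.any (fun x => PySem.Set.contains s2 (d - x))

-- ===== PRECONDITION & SPEC =====
def Spec_solve (l : List Int) (t0 : Int) (t : Int) (out : Bool) : Prop := out = solve_alt l t0 t
instance (l : List Int) (t0 : Int) (t : Int) (out : Bool) : Decidable (Spec_solve l t0 t out) := by unfold Spec_solve; infer_instance

-- ===== CLAIM (what is proved, stated in full; the proofs are below) =====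
def Claim_equal_solve : Prop := ∀ (l : List Int) (t0 : Int) (t : Int), Dom_solve l t0 t → Spec_solve l t0 t (solve l t0 t)

-- ===== LEMMAS AND PROOFS =====

-- the set of offsets reachable by choosing ±v for each v in vs
def Off : List Int → Int → Prop
  | [], d => d = 0
  | v :: r, d => Off r (d - v) ∨ Off r (d + v)

theorem mem_solveStep (ps : PySem.Set Int) (v y : Int) :
    y ∈ solveStep ps v ↔ ∃ a ∈ ps, y = a + v ∨ y = a - v := by
  unfold solveStep
  induction ps using List.reverseRecOn with
  | nil => simp [PySem.Set.empty]
  | append_singleton xs x ih =>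
      simp only [List.foldl_append, List.foldl_cons, List.foldl_nil,
        PySem.Set.mem_add, ih, List.mem_append, List.mem_singleton]
      constructor
      · rintro (((⟨a, ha, h⟩) | h) | h)
        · exact ⟨a, Or.inl ha, h⟩
        · exact ⟨x, Or.inr rfl, Or.inl h⟩
        · exact ⟨x, Or.inr rfl, Or.inr h⟩
      · rintro ⟨a, (ha | rfl), h⟩
        · exact Or.inl (Or.inl ⟨a, ha, h⟩)
        · rcases h with h | h
          · exact Or.inl (Or.inr h)
          · exact Or.inr h

theorem memA (vs : List Int) (s : PySem.Set Int) (y : Int) :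
    y ∈ vs.foldl solveStep s ↔ ∃ a ∈ s, Off vs (y - a) := by
  induction vs generalizing s with
  | nil => simp [Off, sub_eq_zero]
  | cons v r ih =>
      simp only [List.foldl_cons, ih, mem_solveStep, Off]
      constructor
      · rintro ⟨b, ⟨a, ha, (rfl | rfl)⟩, h⟩
        · exact ⟨a, ha, Or.inl (by ring_nf; ring_nf at h; exact h)⟩
        · exact ⟨a, ha, Or.inr (by ring_nf; ring_nf at h; exact h)⟩
      · rintro ⟨a, ha, (h | h)⟩
        · exact ⟨a + v, ⟨a, ha, Or.inl rfl⟩, by ring_nf; ring_nf at h; exact h⟩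
        · exact ⟨a - v, ⟨a, ha, Or.inr rfl⟩, by ring_nf; ring_nf at h; exact h⟩

theorem memB (vs : List Int) (y : Int) : y ∈ sumsB vs ↔ Off vs y := by
  unfold sumsB
  suffices h : ∀ (s : PySem.Set Int),
      y ∈ vs.foldl (fun s v => PySem.Set.union (PySem.Set.ofList (s.map (fun a => a + v))) (s.map (fun a => a - v))) s
        ↔ ∃ a ∈ s, Off vs (y - a) by
    rw [h]; simp [PySem.Set.mem_add, PySem.Set.empty]
  induction vs with
  | nil => intro s; simp [Off, sub_eq_zero]
  | cons v r ih =>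
      intro s
      simp only [List.foldl_cons, ih, PySem.Set.mem_union, PySem.Set.mem_ofList, List.mem_map, Off]
      constructor
      · rintro ⟨b, (⟨a, ha, rfl⟩ | ⟨a, ha, rfl⟩), h⟩
        · exact ⟨a, ha, Or.inl (by ring_nf; ring_nf at h; exact h)⟩
        · exact ⟨a, ha, Or.inr (by ring_nf; ring_nf at h; exact h)⟩
      · rintro ⟨a, ha, (h | h)⟩
        · exact ⟨a + v, Or.inl ⟨a, ha, rfl⟩, by ring_nf; ring_nf at h; exact h⟩
        · exact ⟨a - v, Or.inr ⟨a, ha, rfl⟩, by ring_nf; ring_nf at h; exact h⟩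

theorem off_congr (r : List Int) {a b : Int} (h : a = b) : Off r a ↔ Off r b := by rw [h]

theorem off_append (l1 l2 : List Int) (d : Int) :
    Off (l1 ++ l2) d ↔ ∃ x, Off l1 x ∧ Off l2 (d - x) := by
  induction l1 generalizing d with
  | nil => simp [Off]
  | cons v r ih =>
      simp only [List.cons_append, Off, ih]
      constructor
      · rintro (⟨x, hx, h⟩ | ⟨x, hx, h⟩)
        · exact ⟨x + v, Or.inl ((off_congr r (by ring)).mp hx), (off_congr l2 (by ring)).mp h⟩
        · exact ⟨x - v, Or.inr ((off_congr r (by ring)).mp hx), (off_congr l2 (by ring)).mp h⟩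
      · rintro ⟨x, (hx | hx), h⟩
        · exact Or.inl ⟨x - v, hx, (off_congr l2 (by ring)).mp h⟩
        · exact Or.inr ⟨x + v, hx, (off_congr l2 (by ring)).mp h⟩

-- ===== VERDICT (by name: the statement is the Claim_ definition above) =====
theorem solve_spec : Claim_equal_solve := by
  intro l t0 t _
  unfold Spec_solve solve solve_alt
  rw [Bool.eq_iff_iff]
  simp only [PySem.Set.contains_iff, List.any_eq_true, memA, memB,
    PySem.Set.mem_add, PySem.Set.empty, List.not_mem_nil, false_or]
  have hsplit : l = l.take (l.length / 2) ++ l.drop (l.length / 2) := (List.take_append_drop _ _).symm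
  constructor
  · rintro ⟨a, rfl, h⟩
    rw [hsplit, off_append] at h
    obtain ⟨x, h1, h2⟩ := h
    exact ⟨x, h1, h2⟩
  · rintro ⟨x, h1, h2⟩
    refine ⟨t0, rfl, ?_⟩
    rw [hsplit, off_append]
    exact ⟨x, h1, h2⟩
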